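-- pv_equiv track=rewrite | github.com/josephjojoe/chai-mlx | chai1_mlx_port/src/chai1_mlx/data/collate.py | get_pad_sizes
-- ===== SOURCE A (Python) =====
-- from typing import Sequence
--
-- AVAILABLE_MODEL_SIZES = [256, 384, 512, 768, 1024, 1536, 2048]
--
-- ATOM_MULTIPLIER = 23
--
-- def get_pad_sizes(
--     n_tokens: int,
--     n_atoms: int,
--     supported_sizes: Sequence[int] = AVAILABLE_MODEL_SIZES,
-- ) -> tuple[int, int]:
--     """Compute padded token and atom counts."""
--     for size in sorted(supported_sizes):
--         if size >= n_tokens: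
--             padded_tokens = size
--             padded_atoms = ATOM_MULTIPLIER * padded_tokens
--             if padded_atoms >= n_atoms:
--                 assert padded_atoms % 32 == 0, f"Padded atoms {padded_atoms} not divisible by 32"
--                 return padded_tokens, padded_atoms
--     raise ValueError(
--         f"n_tokens={n_tokens} exceeds max supported size {max(supported_sizes)}"
--     )
-- ===== SOURCE B (Python) =====
-- AVAILABLE_MODEL_SIZES = [256, 384, 512, 768, 1024, 1536, 2048]
--
-- ATOM_MULTIPLIER = 23
--
-- def get_pad_sizes(n_tokens, n_atoms, supported_sizes=AVAILABLE_MODEL_SIZES):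
--     """Compute padded token and atom counts."""
--     required = max(n_tokens, -(-n_atoms // ATOM_MULTIPLIER))
--     candidates = [s for s in supported_sizes if s >= required]
--     if not candidates:
--         raise ValueError(
--             f"n_tokens={n_tokens} exceeds max supported size {max(supported_sizes)}"
--         )
--     padded_tokens = min(candidates)
--     padded_atoms = ATOM_MULTIPLIER * padded_tokens
--     assert padded_atoms % 32 == 0, f"Padded atoms {padded_atoms} not divisible by 32"
--     return padded_tokens, padded_atoms
-- ===== Notes on version B (the rewrite author's own statement) =====
-- stated objective: simpler
-- what changed: Replaces A's scan over sorted(supported_sizes) with two nested monotone tests by computing a single threshold required = max(n_tokens, ceil(n_atoms/23)) and taking min of the sizes that meet it - no sorting at all.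
import Mathlib
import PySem

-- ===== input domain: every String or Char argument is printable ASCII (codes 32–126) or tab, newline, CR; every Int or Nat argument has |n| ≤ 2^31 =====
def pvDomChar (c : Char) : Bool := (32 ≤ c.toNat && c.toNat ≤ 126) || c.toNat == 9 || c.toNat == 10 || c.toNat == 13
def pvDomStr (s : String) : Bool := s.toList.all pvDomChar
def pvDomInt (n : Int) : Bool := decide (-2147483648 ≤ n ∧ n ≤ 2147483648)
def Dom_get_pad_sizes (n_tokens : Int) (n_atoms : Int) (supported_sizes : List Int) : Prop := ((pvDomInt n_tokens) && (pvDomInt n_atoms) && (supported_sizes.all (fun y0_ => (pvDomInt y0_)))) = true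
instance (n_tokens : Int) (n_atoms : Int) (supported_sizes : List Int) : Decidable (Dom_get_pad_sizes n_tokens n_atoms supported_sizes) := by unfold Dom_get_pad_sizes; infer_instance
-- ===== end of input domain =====

-- B replaces A's scan over the sorted list by a single threshold (required = max(n_tokens, ceil(n_atoms/23))),
-- a filter and min — no sort at all; objective: simpler. Return-value equivalence on Pre_ (no exceptions there).

-- ===== PORT A =====
-- the for-loop over sorted(supported_sizes); none = the loop falls through (ValueError) or the assert fires
def pvLoopA (n_tokens : Int) (n_atoms : Int) : List Int → Option (Int × Int)
  | [] => none
  | size :: rest =>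
    if n_tokens ≤ size then
      if n_atoms ≤ 23 * size then
        if PySem.Int.mod (23 * size) 32 = 0 then some (size, 23 * size)
        else none  -- assert failure: AssertionError (outside Pre_)
      else pvLoopA n_tokens n_atoms rest
    else pvLoopA n_tokens n_atoms rest

def get_pad_sizes (n_tokens : Int) (n_atoms : Int) (supported_sizes : List Int) : Int × Int :=
  (pvLoopA n_tokens n_atoms (PySem.List.sorted supported_sizes (fun x => x) false)).getD (0, 0)

-- ===== PORT B =====
def get_pad_sizes_alt (n_tokens : Int) (n_atoms : Int) (supported_sizes : List Int) : Int × Int :=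
  let required := max n_tokens (-(PySem.Int.floordiv (-n_atoms) 23))
  let candidates := supported_sizes.filter (fun s => decide (required ≤ s))
  match PySem.List.min? candidates (fun x => x) with
  | none => (0, 0)  -- ValueError (outside Pre_)
  | some padded_tokens =>
    if PySem.Int.mod (23 * padded_tokens) 32 = 0 then (padded_tokens, 23 * padded_tokens)
    else (0, 0)  -- assert failure (outside Pre_)

-- ===== PRECONDITION & SPEC =====
-- Pre_ holds exactly where the Python A returns normally: some supported size meets both bounds
-- (else ValueError) and the smallest such size passes the divisibility-by-32 assert.
def Pre_get_pad_sizes (n_tokens : Int) (n_atoms : Int) (supported_sizes : List Int) : Prop :=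
  let c := supported_sizes.filter
    (fun s => decide (max n_tokens (-(PySem.Int.floordiv (-n_atoms) 23)) ≤ s))
  c ≠ [] ∧ PySem.Int.mod (23 * ((PySem.List.min? c (fun x => x)).getD 0)) 32 = 0
instance (n_tokens : Int) (n_atoms : Int) (supported_sizes : List Int) : Decidable (Pre_get_pad_sizes n_tokens n_atoms supported_sizes) := by unfold Pre_get_pad_sizes; infer_instance

def pvWitness_get_pad_sizes : Int × Int × List Int := (1, 1, [32])

def Spec_get_pad_sizes (n_tokens : Int) (n_atoms : Int) (supported_sizes : List Int) (out : Int × Int) : Prop := out = get_pad_sizes_alt n_tokens n_atoms supported_sizes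
instance (n_tokens : Int) (n_atoms : Int) (supported_sizes : List Int) (out : Int × Int) : Decidable (Spec_get_pad_sizes n_tokens n_atoms supported_sizes out) := by unfold Spec_get_pad_sizes; infer_instance

-- ===== CLAIM (what is proved, stated in full; the proofs are below) =====
def Claim_equal_get_pad_sizes : Prop := ∀ (n_tokens : Int) (n_atoms : Int) (supported_sizes : List Int), Dom_get_pad_sizes n_tokens n_atoms supported_sizes → Pre_get_pad_sizes n_tokens n_atoms supported_sizes → Spec_get_pad_sizes n_tokens n_atoms supported_sizes (get_pad_sizes n_tokens n_atoms supported_sizes)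

-- ===== LEMMAS AND PROOFS =====

-- n_atoms ≤ 23*s  ↔  ceil(n_atoms/23) ≤ s
theorem pv_ceil_le (na s : Int) : (-(PySem.Int.floordiv (-na) 23) ≤ s) ↔ na ≤ 23 * s := by
  rw [neg_le, PySem.Int.le_floordiv_iff_mul_le (by norm_num : (0:Int) < 23)]
  constructor <;> intro h <;> omega

-- A's loop = find the first element meeting the combined threshold, then assert + pair
theorem pv_loopA_find (nt na : Int) (xs : List Int) :
    pvLoopA nt na xs =
      match xs.find? (fun s => decide (max nt (-(PySem.Int.floordiv (-na) 23)) ≤ s)) with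
      | none => none
      | some s => if PySem.Int.mod (23 * s) 32 = 0 then some (s, 23 * s) else none := by
  induction xs with
  | nil => rfl
  | cons x t ih =>
    by_cases h1 : nt ≤ x
    · by_cases h2 : na ≤ 23 * x
      · have hP : (fun s => decide (max nt (-(PySem.Int.floordiv (-na) 23)) ≤ s)) x = true :=
          decide_eq_true (max_le h1 ((pv_ceil_le na x).mpr h2))
        rw [List.find?_cons_of_pos (p := (fun s => decide (max nt (-(PySem.Int.floordiv (-na) 23)) ≤ s))) hP]
        simp only [pvLoopA, if_pos h1, if_pos h2]
      · have hP : ¬ (fun s => decide (max nt (-(PySem.Int.floordiv (-na) 23)) ≤ s)) x = true := by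
          simp only [decide_eq_true_eq]
          exact fun h => h2 ((pv_ceil_le na x).mp (le_trans (le_max_right _ _) h))
        rw [List.find?_cons_of_neg (p := (fun s => decide (max nt (-(PySem.Int.floordiv (-na) 23)) ≤ s))) hP]
        simp only [pvLoopA, if_pos h1, if_neg h2]
        exact ih
    · have hP : ¬ (fun s => decide (max nt (-(PySem.Int.floordiv (-na) 23)) ≤ s)) x = true := by
        simp only [decide_eq_true_eq]
        exact fun h => h1 (le_trans (le_max_left _ _) h)
      rw [List.find?_cons_of_neg (p := (fun s => decide (max nt (-(PySem.Int.floordiv (-na) 23)) ≤ s))) hP]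
      simp only [pvLoopA, if_neg h1]
      exact ih

theorem pv_find?_eq_head?_filter {α : Type} (p : α → Bool) (xs : List α) :
    xs.find? p = (xs.filter p).head? := by
  induction xs with
  | nil => rfl
  | cons x t ih =>
    by_cases h : p x = true
    · rw [List.find?_cons_of_pos h, List.filter_cons_of_pos h]; rfl
    · rw [List.find?_cons_of_neg h, List.filter_cons_of_neg h]; exact ih

-- head of the (sorted, hence pairwise-≤) filtered list = min of the unsorted filtered list
theorem pv_head?_eq_min? (c d : List Int) (hperm : c.Perm d) (hp : c.Pairwise (· ≤ ·)) :
    c.head? = PySem.List.min? d (fun x => x) := by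
  cases c with
  | nil =>
    have hd : d = [] := List.Perm.eq_nil hperm.symm
    subst hd; rfl
  | cons h t =>
    have hmem : h ∈ d := hperm.mem_iff.mp (List.mem_cons_self ..)
    have hne : d ≠ [] := by intro e; subst e; exact absurd hmem (List.not_mem_nil)
    obtain ⟨m, hm⟩ : ∃ m, PySem.List.min? d (fun x => x) = some m := by
      cases e : PySem.List.min? d (fun x => x) with
      | none => exact absurd ((PySem.List.min?_eq_none_iff d _).mp e) hne
      | some m => exact ⟨m, rfl⟩
    have hmmem : m ∈ d := PySem.List.min?_mem hm
    have hle : ∀ y ∈ (h :: t), h ≤ y := by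
      intro y hy
      rcases List.mem_cons.mp hy with e | hy'
      · exact e ▸ le_refl _
      · exact (List.pairwise_cons.mp hp).1 y hy'
    have h1 : h ≤ m := hle m (hperm.mem_iff.mpr hmmem)
    have h2 : m ≤ h := PySem.List.min?_isMin hm h hmem
    simp [hm, le_antisymm h1 h2]

theorem pv_getD_match (o : Option Int) :
    (match o with
      | none => none
      | some s => if PySem.Int.mod (23 * s) 32 = 0 then some (s, 23 * s) else none).getD ((0:Int), (0:Int)) =
    (match o with
      | none => ((0:Int), (0:Int))
      | some s => if PySem.Int.mod (23 * s) 32 = 0 then (s, 23 * s) else (0, 0)) := by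
  cases o with
  | none => rfl
  | some s =>
    show (if PySem.Int.mod (23 * s) 32 = 0 then some ((s:Int), 23 * s) else none).getD ((0:Int), (0:Int)) =
      (if PySem.Int.mod (23 * s) 32 = 0 then ((s:Int), 23 * s) else ((0:Int), (0:Int)))
    by_cases h : PySem.Int.mod (23 * s) 32 = 0
    · rw [if_pos h, if_pos h]; rfl
    · rw [if_neg h, if_neg h]; rfl

theorem get_pad_sizes_eq_alt (nt na : Int) (l : List Int) :
    get_pad_sizes nt na l = get_pad_sizes_alt nt na l := by
  have hperm : ((PySem.List.sorted l (fun x => x) false).filter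
      (fun s => decide (max nt (-(PySem.Int.floordiv (-na) 23)) ≤ s))).Perm
      (l.filter (fun s => decide (max nt (-(PySem.Int.floordiv (-na) 23)) ≤ s))) :=
    (PySem.List.sorted_perm l (fun x => x) false).filter _
  have hpw : ((PySem.List.sorted l (fun x => x) false).filter
      (fun s => decide (max nt (-(PySem.Int.floordiv (-na) 23)) ≤ s))).Pairwise (· ≤ ·) :=
    (PySem.List.sorted_pairwise l (fun x => x)).filter _
  unfold get_pad_sizes
  rw [pv_loopA_find, pv_find?_eq_head?_filter, pv_head?_eq_min? _ _ hperm hpw, pv_getD_match]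
  rfl

-- ===== VERDICT (by name: the statement is the Claim_ definition above) =====
theorem get_pad_sizes_spec : Claim_equal_get_pad_sizes := by
  intro nt na l _ _
  unfold Spec_get_pad_sizes
  exact get_pad_sizes_eq_alt nt na l
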